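-- pv_equiv track=rewrite | github.com/rpparas/LeetCode-Programming-Problems | Strings/GroupAnagrams.py | get_anagram_signature
-- ===== SOURCE A (Python) =====
-- import collections
--
-- def get_anagram_signature(word):
--     # ignore/remove all spaces and extra chars
--     # sort letters in word using OrderedDictionary
--
--     d = collections.OrderedDict()
--     for w in word:
--         w = w.lower()
--         if w in d:
--             d[w] = d[w] + 1
--         else:
--             d[w] = 1
--
--     # assume sorting letters is done via QuickSort, otherwise, write our own function?
--     d = collections.OrderedDict(sorted(d.items()))
--     output = ""
--     for i, k in d.items():
--         output += i * k
--     return output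
-- ===== SOURCE B (Python) =====
-- def get_anagram_signature(word):
--     return ''.join(sorted(c.lower() for c in word))
-- ===== Notes on version B (the rewrite author's own statement) =====
-- stated objective: simpler
-- what changed: Replaces the OrderedDict frequency count plus sorted-items reconstruction with a single direct sort of the lowercased characters.
import Mathlib
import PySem

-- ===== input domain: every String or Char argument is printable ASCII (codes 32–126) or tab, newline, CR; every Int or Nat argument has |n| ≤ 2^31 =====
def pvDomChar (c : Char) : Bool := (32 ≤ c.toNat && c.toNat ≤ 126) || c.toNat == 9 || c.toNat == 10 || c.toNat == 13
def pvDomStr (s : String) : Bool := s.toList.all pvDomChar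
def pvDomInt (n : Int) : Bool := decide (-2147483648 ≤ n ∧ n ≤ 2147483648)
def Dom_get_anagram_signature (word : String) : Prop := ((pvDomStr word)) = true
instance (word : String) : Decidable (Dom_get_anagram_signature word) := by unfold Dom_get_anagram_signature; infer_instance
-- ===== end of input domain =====

-- B replaces A's OrderedDict frequency count + sorted-items reconstruction with one direct sort of the lowercased characters (objective: simpler).

-- ===== PORT A =====
-- for w in word: w = w.lower(); if w in d: d[w] += 1 else: d[w] = 1
def pvCountLoop_get_anagram_signature (word : String) : PySem.Dict Char Int :=
  word.toList.foldl
    (fun d c =>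
      let w := PySem.Chars.lowerChar c
      if d.contains w then d.insert w (d.getD w 0 + 1) else d.insert w 1)
    PySem.Dict.empty

-- d = collections.OrderedDict(sorted(d.items()))  (tuples compared lexicographically), then
-- output = ""; for i, k in d.items(): output += i * k
def get_anagram_signature (word : String) : String :=
  String.ofList
    ((PySem.Dict.ofList (PySem.List.sorted2 (pvCountLoop_get_anagram_signature word).items
        (fun p => p.1) (fun p => p.2) false)).items.foldl
      (fun acc p => acc ++ PySem.List.pyRepeat [p.1] p.2) [])

-- ===== PORT B =====
-- return ''.join(sorted(c.lower() for c in word))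
def get_anagram_signature_alt (word : String) : String :=
  String.ofList (PySem.List.sorted (word.toList.map PySem.Chars.lowerChar) (fun c => c) false)

-- ===== PRECONDITION & SPEC =====
def Spec_get_anagram_signature (word : String) (out : String) : Prop := out = get_anagram_signature_alt word
instance (word : String) (out : String) : Decidable (Spec_get_anagram_signature word out) := by unfold Spec_get_anagram_signature; infer_instance

-- ===== CLAIM (what is proved, stated in full; the proofs are below) =====
def Claim_equal_get_anagram_signature : Prop := ∀ (word : String), Dom_get_anagram_signature word → Spec_get_anagram_signature word (get_anagram_signature word)

-- ===== LEMMAS AND PROOFS =====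

-- insertBy only compares the inserted element with members of the accumulator
theorem pv_insertBy_congr {α : Type} (lt lt' : α → α → Bool) (x : α) (acc : List α)
    (h : ∀ b ∈ acc, lt x b = lt' x b) :
    PySem.List.insertBy lt x acc = PySem.List.insertBy lt' x acc := by
  induction acc with
  | nil => rfl
  | cons y ys ih =>
    simp only [PySem.List.insertBy, h y (by simp)]
    split
    · rfl
    · simp only [List.cons.injEq, true_and]
      exact ih (fun b hb => h b (by simp [hb]))

-- an insertion-sort fold is unchanged when the two comparators agree on all pairs drawn from L
theorem pv_foldl_insertBy_congr {α : Type} (lt lt' : α → α → Bool) (L : List α)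
    (h : ∀ a ∈ L, ∀ b ∈ L, lt a b = lt' a b) :
    ∀ (xs acc : List α), (∀ x ∈ xs, x ∈ L) → (∀ x ∈ acc, x ∈ L) →
      xs.foldl (fun acc x => PySem.List.insertBy lt x acc) acc
        = xs.foldl (fun acc x => PySem.List.insertBy lt' x acc) acc := by
  intro xs
  induction xs with
  | nil => intro acc _ _; rfl
  | cons x xs ih =>
    intro acc hxs hacc
    have hx : x ∈ L := hxs x (by simp)
    simp only [List.foldl_cons]
    rw [pv_insertBy_congr lt lt' x acc (fun b hb => h x hx b (hacc b hb))]
    exact ih _ (fun y hy => hxs y (by simp [hy]))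
      (fun y hy => Or.elim ((PySem.List.mem_insertBy _ _ _ _).mp hy)
        (fun he => he ▸ hx) (fun hm => hacc y hm))

-- on a list whose elements are determined by their first component, Python's tuple sort is the sort by first component
theorem pv_sorted2_eq_sorted_fst {ν : Type} [LinearOrder ν]
    (xs : List (Char × ν)) (hdet : ∀ a ∈ xs, ∀ b ∈ xs, a.1 = b.1 → a = b) :
    PySem.List.sorted2 xs (fun p => p.1) (fun p => p.2) false
      = PySem.List.sorted xs (fun p => p.1) false := by
  rw [PySem.List.sorted_eq_foldl_insertBy]
  show xs.foldl (fun acc x => PySem.List.insertBy _ x acc) [] = _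
  exact pv_foldl_insertBy_congr _ _ xs
    (by
      intro a ha b hb
      rcases lt_trichotomy a.1 b.1 with hlt | heq | hgt
      · simp [hlt, not_lt_of_gt hlt]
      · have : a = b := hdet a ha b hb heq
        subst this; simp
      · simp [hgt, not_lt_of_gt hgt])
    xs [] (fun _ hx => hx) (by simp)

-- counting in a concatenation of constant blocks over distinct keys
theorem pv_count_flatMap_replicate (K : List Char) (hK : K.Nodup) (cnt : Char → Nat) (a : Char) :
    (K.flatMap (fun k => List.replicate (cnt k) k)).count a
      = if a ∈ K then cnt a else 0 := by
  induction K with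
  | nil => simp
  | cons k K ih =>
    have hK' : K.Nodup := hK.of_cons
    simp only [List.flatMap_cons, List.count_append, ih hK', List.count_replicate]
    by_cases hak : a = k
    · subst hak
      have : a ∉ K := by simpa using (List.nodup_cons.mp hK).1
      simp [this]
    · simp [hak, Ne.symm hak]

-- a concatenation of constant blocks over strictly increasing keys is sorted
theorem pv_pairwise_flatMap_replicate (K : List Char) (cnt : Char → Nat)
    (hK : K.Pairwise (· < ·)) :
    (K.flatMap (fun k => List.replicate (cnt k) k)).Pairwise (· ≤ ·) := by
  induction K with
  | nil => simp
  | cons k K ih =>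
    rcases List.pairwise_cons.mp hK with ⟨hkK, hK'⟩
    simp only [List.flatMap_cons]
    rw [List.pairwise_append]
    refine ⟨?_, ih hK', ?_⟩
    · rw [List.pairwise_replicate]; right; exact le_refl k
    · intro x hx y hy
      have hxk : x = k := List.eq_of_mem_replicate hx
      rcases List.mem_flatMap.mp hy with ⟨kb, hkb, hyb⟩
      have hyk : y = kb := List.eq_of_mem_replicate hyb
      subst hxk
      rw [hyk]
      exact le_of_lt (hkK kb hkb)

-- ===== VERDICT (by name: the statement is the Claim_ definition above) =====
theorem get_anagram_signature_spec : Claim_equal_get_anagram_signature := by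
  intro word _
  unfold Spec_get_anagram_signature get_anagram_signature get_anagram_signature_alt
  set m : List Char := word.toList.map PySem.Chars.lowerChar with hm
  -- Step 1: A's counting loop is Counter(m)
  have hd : pvCountLoop_get_anagram_signature word = PySem.Dict.counter m := by
    unfold pvCountLoop_get_anagram_signature
    rw [← PySem.Dict.foldl_insert_getD_add_one_eq_counter, hm, List.foldl_map]
    exact PySem.List.foldl_congr_mem _ _ _ _ (by
      intro d c _
      by_cases h : d.contains (PySem.Chars.lowerChar c)
      · simp [h]
      · have h' : d.contains (PySem.Chars.lowerChar c) = false := by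
          simpa using h
        simp [h', PySem.Dict.getD_of_not_contains d 0 h'])
  rw [hd]
  -- Step 2: the sorted items list, via the sorted distinct keys K
  set K : List Char := PySem.List.sorted (PySem.Set.ofList m) (fun k => k) false with hKdef
  have hKnd : K.Nodup :=
    ((PySem.List.sorted_perm (PySem.Set.ofList m) (fun k => k) false).nodup_iff).mpr
      (PySem.Set.nodup_ofList m)
  have hKlt : K.Pairwise (· < ·) := PySem.List.sorted_ofList_pairwise_lt m
  set g : Char → Char × Int := fun k => (k, (m.count k : Int)) with hg
  have hitems : (PySem.Dict.counter m).items = (PySem.Set.ofList m).map g :=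
    PySem.Dict.items_counter m
  have hsort : PySem.List.sorted2 (PySem.Dict.counter m).items
      (fun p => p.1) (fun p => p.2) false = K.map g := by
    rw [pv_sorted2_eq_sorted_fst]
    · refine PySem.List.sorted_eq_of_perm_of_pairwise_lt _ _ _ ?_ ?_
      · rw [hitems]
        exact ((PySem.List.sorted_perm (PySem.Set.ofList m) (fun k => k) false).map g)
      · exact List.Pairwise.map g (fun a b h => h) hKlt
    · rw [hitems]
      intro a ha b hb h1
      rcases List.mem_map.mp ha with ⟨ka, _, hka⟩
      rcases List.mem_map.mp hb with ⟨kb, _, hkb⟩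
      subst hka hkb
      simp only [hg] at h1 ⊢
      simp [h1]
  -- Step 3: the rebuilt OrderedDict has exactly the sorted items
  have hfresh : ∀ a ∈ K.map g, (PySem.Dict.empty : PySem.Dict Char Int).contains a.1 = false :=
    fun a _ => PySem.Dict.contains_empty a.1
  have hnodupfst : ((K.map g).map (fun p : Char × Int => p.1)).Nodup := by
    simpa [hg, List.map_map, Function.comp_def] using hKnd
  have hofl : (PySem.Dict.ofList (K.map g)).items = K.map g := by
    show ((K.map g).foldl (fun d p => d.insert p.1 p.2) PySem.Dict.empty).items = K.map g
    rw [PySem.Dict.items_foldl_insert_fresh (K.map g) (fun p => p.1) (fun p => p.2)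
      PySem.Dict.empty hfresh hnodupfst]
    simp [Function.comp_def, PySem.Dict.empty]
  rw [hsort, hofl]
  -- Step 4: the emission loop is a flatMap of replicate blocks
  rw [PySem.List.foldl_append_eq_flatMap, List.flatMap_map]
  have hrep : ∀ k : Char, PySem.List.pyRepeat [(g k).1] (g k).2 = List.replicate (m.count k) k := by
    intro k
    rw [hg]
    simp [PySem.List.pyRepeat_singleton]
  have hflat : (K.flatMap fun k => PySem.List.pyRepeat [(g k).1] (g k).2)
      = K.flatMap (fun k => List.replicate (m.count k) k) := by
    exact List.flatMap_congr (fun k _ => hrep k)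
  rw [List.nil_append, hflat]
  -- Step 5: that concatenation IS sorted(m)
  have hB : PySem.List.sorted m (fun c => c) false
      = K.flatMap (fun k => List.replicate (m.count k) k) := by
    refine PySem.List.sorted_id_eq_of_perm_of_pairwise _ _ ?_ ?_
    · rw [List.perm_iff_count]
      intro a
      rw [pv_count_flatMap_replicate K hKnd (fun k => m.count k) a]
      by_cases ham : a ∈ m
      · have : a ∈ K := by
          rw [hKdef, PySem.List.mem_sorted, PySem.Set.mem_ofList]; exact ham
        simp [this]
      · have : a ∉ K := by
          rw [hKdef, PySem.List.mem_sorted, PySem.Set.mem_ofList]; exact ham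
        simp [this, List.count_eq_zero.mpr ham]
    · exact pv_pairwise_flatMap_replicate K _ hKlt
  rw [hB]
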